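-- pv_equiv track=rewrite | github.com/SK-Rookies-Module-2/Vuln-Inspector | plugins/remote/linux_kisa_u02_password_policy/main.py | build_effective_policy
-- ===== SOURCE A (Python) =====
-- def build_effective_policy(
--     pwquality_conf: dict,
--     pwquality_opts: dict,
--     pwhistory_opts: dict,
--     unix_opts: dict,
--     login_defs: dict,
-- ) -> dict:
--     policy = {}
--
--     # pwquality 계열
--     for key in ["difok", "minlen", "dcredit", "ucredit", "lcredit", "ocredit"]:
--         v = pwquality_opts.get(key)
--         if v is None:
--             v = pwquality_conf.get(key)
--         policy[key] = v
--
--     # remember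
--     v = pwhistory_opts.get("remember")
--     if v is None:
--         v = unix_opts.get("remember")
--     policy["remember"] = v
--
--     # password aging
--     policy["PASS_MIN_DAYS"] = login_defs.get("PASS_MIN_DAYS")
--     policy["PASS_MAX_DAYS"] = login_defs.get("PASS_MAX_DAYS")
--
--     return policy
-- ===== SOURCE B (Python) =====
-- _PWQ_KEYS = ("difok", "minlen", "dcredit", "ucredit", "lcredit", "ocredit")
--
--
-- def build_effective_policy(
--     pwquality_conf: dict,
--     pwquality_opts: dict,
--     pwhistory_opts: dict,
--     unix_opts: dict,
--     login_defs: dict,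
-- ) -> dict:
--     # Seed every output key with None, then overlay the sources in increasing
--     # precedence, copying only the relevant non-None entries of each source.
--     policy = {
--         "difok": None, "minlen": None, "dcredit": None,
--         "ucredit": None, "lcredit": None, "ocredit": None,
--         "remember": None, "PASS_MIN_DAYS": None, "PASS_MAX_DAYS": None,
--     }
--     layers = [
--         (pwquality_conf, _PWQ_KEYS),
--         (pwquality_opts, _PWQ_KEYS),
--         (unix_opts, ("remember",)),
--         (pwhistory_opts, ("remember",)),
--         (login_defs, ("PASS_MIN_DAYS", "PASS_MAX_DAYS")),
--     ]
--     for src, wanted in layers: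
--         for k, v in src.items():
--             if k in wanted and v is not None:
--                 policy[k] = v
--     return policy
-- ===== Notes on version B (the rewrite author's own statement) =====
-- stated objective: alternative
-- what changed: B inverts the traversal: instead of A's key-major 'get this key, fall back to that dict' lookups, it seeds all nine output keys with None and overlays each source dict once in increasing precedence, copying its relevant non-None entries.
import Mathlib
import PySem

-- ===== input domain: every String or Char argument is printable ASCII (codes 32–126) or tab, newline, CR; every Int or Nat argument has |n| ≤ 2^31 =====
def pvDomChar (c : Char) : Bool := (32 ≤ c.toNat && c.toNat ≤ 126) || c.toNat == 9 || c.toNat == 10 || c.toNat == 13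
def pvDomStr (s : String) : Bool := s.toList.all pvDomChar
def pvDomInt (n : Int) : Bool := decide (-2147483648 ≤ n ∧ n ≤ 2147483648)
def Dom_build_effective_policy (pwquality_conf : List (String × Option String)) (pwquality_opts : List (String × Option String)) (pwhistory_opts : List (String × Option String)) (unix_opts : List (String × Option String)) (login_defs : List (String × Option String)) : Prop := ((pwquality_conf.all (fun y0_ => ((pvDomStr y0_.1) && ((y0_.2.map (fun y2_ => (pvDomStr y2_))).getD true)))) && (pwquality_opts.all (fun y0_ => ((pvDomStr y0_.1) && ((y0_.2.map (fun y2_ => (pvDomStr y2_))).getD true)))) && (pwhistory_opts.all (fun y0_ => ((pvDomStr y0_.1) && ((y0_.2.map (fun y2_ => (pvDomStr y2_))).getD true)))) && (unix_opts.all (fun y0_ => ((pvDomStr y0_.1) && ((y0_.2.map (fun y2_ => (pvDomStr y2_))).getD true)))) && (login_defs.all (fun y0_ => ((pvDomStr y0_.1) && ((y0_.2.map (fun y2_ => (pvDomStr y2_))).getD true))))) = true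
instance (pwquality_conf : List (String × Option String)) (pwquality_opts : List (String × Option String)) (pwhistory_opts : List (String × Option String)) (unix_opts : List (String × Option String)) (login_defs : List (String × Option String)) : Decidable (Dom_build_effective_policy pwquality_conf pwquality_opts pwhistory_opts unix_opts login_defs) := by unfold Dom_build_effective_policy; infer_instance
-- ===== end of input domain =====

-- B replaces A's key-major fallback lookups by a source-major overlay merge: it seeds every
-- output key with None and then copies each source's relevant non-None entries over it in
-- increasing precedence (objective: alternative decomposition, same cost).

-- ===== PORT A =====
-- Python's d.get(key) on a dict of Option-String values
-- (missing key and an explicitly stored None both yield none)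
def pyget (d : List (String × Option String)) (k : String) : Option String :=
  ((PySem.Dict.mk d).get? k).join

def build_effective_policy (pwquality_conf : List (String × Option String)) (pwquality_opts : List (String × Option String)) (pwhistory_opts : List (String × Option String)) (unix_opts : List (String × Option String)) (login_defs : List (String × Option String)) : List (String × Option String) :=
  let policy : PySem.Dict String (Option String) := PySem.Dict.empty
  -- for key in [...]: v = pwquality_opts.get(key); if v is None: v = pwquality_conf.get(key); policy[key] = v
  let policy := ["difok", "minlen", "dcredit", "ucredit", "lcredit", "ocredit"].foldl
    (fun pol key =>
      let v := pyget pwquality_opts key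
      let v := if v = none then pyget pwquality_conf key else v
      pol.insert key v) policy
  let v := pyget pwhistory_opts "remember"
  let v := if v = none then pyget unix_opts "remember" else v
  let policy := policy.insert "remember" v
  let policy := policy.insert "PASS_MIN_DAYS" (pyget login_defs "PASS_MIN_DAYS")
  let policy := policy.insert "PASS_MAX_DAYS" (pyget login_defs "PASS_MAX_DAYS")
  policy.items

-- ===== PORT B =====
-- _PWQ_KEYS
def pwqKeys : List String := ["difok", "minlen", "dcredit", "ucredit", "lcredit", "ocredit"]

-- Source B iterates src.items() of each source dict; on the association-list representation this
-- is the list itself (exact because Pre_ demands the unique keys every Python dict has).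
def build_effective_policy_alt (pwquality_conf : List (String × Option String)) (pwquality_opts : List (String × Option String)) (pwhistory_opts : List (String × Option String)) (unix_opts : List (String × Option String)) (login_defs : List (String × Option String)) : List (String × Option String) :=
  let policy : PySem.Dict String (Option String) := PySem.Dict.mk
    [("difok", none), ("minlen", none), ("dcredit", none),
     ("ucredit", none), ("lcredit", none), ("ocredit", none),
     ("remember", none), ("PASS_MIN_DAYS", none), ("PASS_MAX_DAYS", none)]
  let layers : List (List (String × Option String) × List String) :=
    [(pwquality_conf, pwqKeys), (pwquality_opts, pwqKeys),
     (unix_opts, ["remember"]), (pwhistory_opts, ["remember"]),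
     (login_defs, ["PASS_MIN_DAYS", "PASS_MAX_DAYS"])]
  -- for src, wanted in layers: for k, v in src.items(): if k in wanted and v is not None: policy[k] = v
  (layers.foldl
    (fun pol layer =>
      layer.1.foldl
        (fun p kv =>
          if layer.2.contains kv.1 && kv.2.isSome then p.insert kv.1 kv.2 else p)
        pol)
    policy).items

-- ===== PRECONDITION & SPEC =====
-- Pre_ only demands what every real Python input has: the five arguments are dicts, so their
-- association lists carry pairwise-distinct keys (a duplicate-key list represents no Python
-- dict, hence this excludes no input the Python A returns on).
def Pre_build_effective_policy (pwquality_conf : List (String × Option String)) (pwquality_opts : List (String × Option String)) (pwhistory_opts : List (String × Option String)) (unix_opts : List (String × Option String)) (login_defs : List (String × Option String)) : Prop :=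
  (pwquality_conf.map Prod.fst).Nodup ∧ (pwquality_opts.map Prod.fst).Nodup ∧
  (pwhistory_opts.map Prod.fst).Nodup ∧ (unix_opts.map Prod.fst).Nodup ∧
  (login_defs.map Prod.fst).Nodup
instance (pwquality_conf : List (String × Option String)) (pwquality_opts : List (String × Option String)) (pwhistory_opts : List (String × Option String)) (unix_opts : List (String × Option String)) (login_defs : List (String × Option String)) : Decidable (Pre_build_effective_policy pwquality_conf pwquality_opts pwhistory_opts unix_opts login_defs) := by unfold Pre_build_effective_policy; infer_instance

def pvWitness_build_effective_policy : (List (String × Option String)) × (List (String × Option String)) × (List (String × Option String)) × (List (String × Option String)) × (List (String × Option String)) :=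
  ([("minlen", some "8")], [("difok", none)], [("remember", some "5")], [], [("PASS_MAX_DAYS", some "90")])

def Spec_build_effective_policy (pwquality_conf : List (String × Option String)) (pwquality_opts : List (String × Option String)) (pwhistory_opts : List (String × Option String)) (unix_opts : List (String × Option String)) (login_defs : List (String × Option String)) (out : List (String × Option String)) : Prop := out = build_effective_policy_alt pwquality_conf pwquality_opts pwhistory_opts unix_opts login_defs
instance (pwquality_conf : List (String × Option String)) (pwquality_opts : List (String × Option String)) (pwhistory_opts : List (String × Option String)) (unix_opts : List (String × Option String)) (login_defs : List (String × Option String)) (out : List (String × Option String)) : Decidable (Spec_build_effective_policy pwquality_conf pwquality_opts pwhistory_opts unix_opts login_defs out) := by unfold Spec_build_effective_policy; infer_instance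

-- ===== CLAIM =====
def Claim_equal_build_effective_policy : Prop := ∀ (pwquality_conf : List (String × Option String)) (pwquality_opts : List (String × Option String)) (pwhistory_opts : List (String × Option String)) (unix_opts : List (String × Option String)) (login_defs : List (String × Option String)), Dom_build_effective_policy pwquality_conf pwquality_opts pwhistory_opts unix_opts login_defs → Pre_build_effective_policy pwquality_conf pwquality_opts pwhistory_opts unix_opts login_defs → Spec_build_effective_policy pwquality_conf pwquality_opts pwhistory_opts unix_opts login_defs (build_effective_policy pwquality_conf pwquality_opts pwhistory_opts unix_opts login_defs)

-- ===== LEMMAS AND PROOFS =====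

-- one source layer of B's merge, as a named function for the proofs
def overlay (pol : PySem.Dict String (Option String)) (src : List (String × Option String)) (wanted : List String) : PySem.Dict String (Option String) :=
  src.foldl (fun p kv => if wanted.contains kv.1 && kv.2.isSome then p.insert kv.1 kv.2 else p) pol

theorem pyget_nil (k : String) : pyget [] k = none := rfl

theorem pyget_cons (a : String × Option String) (rest : List (String × Option String)) (k : String) :
    pyget (a :: rest) k = if a.1 == k then a.2 else pyget rest k := by
  cases a with
  | mk a1 a2 =>
    simp only [pyget, PySem.Dict.get?_mk_cons]
    split <;> simp

theorem pyget_eq_none_of_not_mem (src : List (String × Option String)) (k : String)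
    (h : k ∉ src.map Prod.fst) : pyget src k = none := by
  induction src with
  | nil => rfl
  | cons a rest ih =>
    simp only [List.map_cons, List.mem_cons, not_or] at h
    rw [pyget_cons]
    have : (a.1 == k) = false := by simp [Ne.symm h.1]
    rw [this]
    exact ih h.2
    
theorem overlay_keys (src : List (String × Option String)) (wanted : List String)
    (pol : PySem.Dict String (Option String))
    (h : ∀ x ∈ wanted, x ∈ pol.keys) : (overlay pol src wanted).keys = pol.keys := by
  induction src generalizing pol with
  | nil => rfl
  | cons a rest ih =>
    show (overlay (if wanted.contains a.1 && a.2.isSome then pol.insert a.1 a.2 else pol) rest wanted).keys = pol.keys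
    by_cases hc : (wanted.contains a.1 && a.2.isSome) = true
    · have hmem : a.1 ∈ wanted := by
        have := (Bool.and_eq_true _ _).mp hc
        simpa using this.1
      have hck : pol.contains a.1 = true :=
        (PySem.Dict.contains_iff_mem_keys pol a.1).mpr (h a.1 hmem)
      rw [if_pos hc]
      rw [ih (pol.insert a.1 a.2) (by rw [PySem.Dict.keys_insert_of_contains _ _ hck]; exact h)]
      exact PySem.Dict.keys_insert_of_contains _ _ hck
    · rw [if_neg hc]; exact ih pol h

theorem overlay_get (src : List (String × Option String)) (wanted : List String)
    (pol : PySem.Dict String (Option String)) (k : String)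
    (hnd : (src.map Prod.fst).Nodup) :
    (overlay pol src wanted).get? k =
      if wanted.contains k && (pyget src k).isSome then some (pyget src k) else pol.get? k := by
  induction src generalizing pol with
  | nil => simp [overlay, pyget_nil]
  | cons a rest ih =>
    simp only [List.map_cons, List.nodup_cons] at hnd
    show (overlay (if wanted.contains a.1 && a.2.isSome then pol.insert a.1 a.2 else pol) rest wanted).get? k = _
    rw [ih _ hnd.2, pyget_cons]
    by_cases hk : a.1 = k
    · subst hk
      have hrest : pyget rest a.1 = none := pyget_eq_none_of_not_mem rest a.1 hnd.1
      rw [hrest]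
      simp only [BEq.rfl] at *
      cases hv : a.2 with
      | none => simp
      | some v =>
        by_cases hw : a.1 ∈ wanted
        · simp [hw, PySem.Dict.get?_insert_self]
        · simp [hw]
    · have hbk : (a.1 == k) = false := by simp [hk]
      rw [hbk]
      simp only [Bool.false_eq_true, if_false]
      by_cases hc : (wanted.contains k && (pyget rest k).isSome) = true
    
      · rw [if_pos hc, if_pos hc]
      · rw [if_neg hc, if_neg hc]
        by_cases hca : (wanted.contains a.1 && a.2.isSome) = true
        · rw [if_pos hca]; exact PySem.Dict.get?_insert_of_ne _ _ (Ne.symm hk)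
        · rw [if_neg hca]

-- items agree as soon as the ordered key lists agree (without duplicates) and get? agrees on them
theorem items_eq_of_keys_get? (d d' : PySem.Dict String (Option String))
    (hk : d.keys = d'.keys) (hn : d.keys.Nodup)
    (hg : ∀ k ∈ d.keys, d.get? k = d'.get? k) : d.items = d'.items := by
  apply List.ext_getElem
  · have h1 : d.items.length = d.keys.length := by simp [PySem.Dict.keys]
    have h2 : d'.items.length = d'.keys.length := by simp [PySem.Dict.keys]
    rw [h1, h2, hk]
  · intro i hi hi'
    have hfst : d.items[i].1 = d.keys[i]'(by simpa [PySem.Dict.keys] using hi) := by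
      simp [PySem.Dict.keys]
    have hfst' : d'.items[i].1 = d'.keys[i]'(by simpa [PySem.Dict.keys] using hi') := by
      simp [PySem.Dict.keys]
    have hkk : d.keys[i]'(by simpa [PySem.Dict.keys] using hi)
        = d'.keys[i]'(by simpa [PySem.Dict.keys] using hi') := by
      simp only [hk]
    have hmem : d.items[i] ∈ d.items := List.getElem_mem _
    have hmem' : d'.items[i] ∈ d'.items := List.getElem_mem _
    have hg1 : d.get? d.items[i].1 = some d.items[i].2 :=
      PySem.Dict.get?_of_mem_items _ hmem hn
    have hg2 : d'.get? d'.items[i].1 = some d'.items[i].2 :=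
      PySem.Dict.get?_of_mem_items _ hmem' (hk ▸ hn)
    have hkeymem : d.items[i].1 ∈ d.keys := by
      rw [hfst]; exact List.getElem_mem _
    have hfsteq : d.items[i].1 = d'.items[i].1 := by rw [hfst, hfst', hkk]
    have hsnd : d.items[i].2 = d'.items[i].2 := by
      have h := hg d.items[i].1 hkeymem
      rw [hg1, hfsteq, hg2] at h
      exact Option.some.inj h
    exact Prod.ext hfsteq hsnd

-- proof-level abbreviations for B's chain and for the common value of both programs
def basePolicy : PySem.Dict String (Option String) := PySem.Dict.mk
  [("difok", none), ("minlen", none), ("dcredit", none),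
   ("ucredit", none), ("lcredit", none), ("ocredit", none),
   ("remember", none), ("PASS_MIN_DAYS", none), ("PASS_MAX_DAYS", none)]

def Bdict (c o h u l : List (String × Option String)) : PySem.Dict String (Option String) :=
  overlay (overlay (overlay (overlay (overlay basePolicy c pwqKeys) o pwqKeys) u ["remember"]) h ["remember"]) l ["PASS_MIN_DAYS", "PASS_MAX_DAYS"]

def targetD (c o h u l : List (String × Option String)) : PySem.Dict String (Option String) :=
  PySem.Dict.mk
    [("difok", if pyget o "difok" = none then pyget c "difok" else pyget o "difok"),
     ("minlen", if pyget o "minlen" = none then pyget c "minlen" else pyget o "minlen"),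
     ("dcredit", if pyget o "dcredit" = none then pyget c "dcredit" else pyget o "dcredit"),
     ("ucredit", if pyget o "ucredit" = none then pyget c "ucredit" else pyget o "ucredit"),
     ("lcredit", if pyget o "lcredit" = none then pyget c "lcredit" else pyget o "lcredit"),
     ("ocredit", if pyget o "ocredit" = none then pyget c "ocredit" else pyget o "ocredit"),
     ("remember", if pyget h "remember" = none then pyget u "remember" else pyget h "remember"),
     ("PASS_MIN_DAYS", pyget l "PASS_MIN_DAYS"),
     ("PASS_MAX_DAYS", pyget l "PASS_MAX_DAYS")]

-- the two fallback shapes B's overlay leaves per key vs A's "get, fall back if None"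
theorem fb2 (x y : Option String) :
    (if x.isSome = true then some x else some y) = some (if x = none then y else x) := by
  cases x <;> simp

set_option maxHeartbeats 1600000 in
-- ===== VERDICT =====
theorem build_effective_policy_spec : Claim_equal_build_effective_policy := by
  intro c o h u l _ hpre
  obtain ⟨hc, ho, hh, hu, hl⟩ := hpre
  unfold Spec_build_effective_policy
  have hA : build_effective_policy c o h u l = (targetD c o h u l).items := rfl
  have hB : build_effective_policy_alt c o h u l = (Bdict c o h u l).items := rfl
  rw [hA, hB]
  have k1 : (overlay basePolicy c pwqKeys).keys = basePolicy.keys :=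
    overlay_keys _ _ _ (by decide)
  have k2 : (overlay (overlay basePolicy c pwqKeys) o pwqKeys).keys = basePolicy.keys := by
    rw [overlay_keys _ _ _ (by rw [k1]; decide)]; exact k1
  have k3 : (overlay (overlay (overlay basePolicy c pwqKeys) o pwqKeys) u ["remember"]).keys = basePolicy.keys := by
    rw [overlay_keys _ _ _ (by rw [k2]; decide)]; exact k2
  have k4 : (overlay (overlay (overlay (overlay basePolicy c pwqKeys) o pwqKeys) u ["remember"]) h ["remember"]).keys = basePolicy.keys := by
    rw [overlay_keys _ _ _ (by rw [k3]; decide)]; exact k3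
  have k5 : (Bdict c o h u l).keys = basePolicy.keys := by
    rw [Bdict, overlay_keys _ _ _ (by rw [k4]; decide)]; exact k4
  apply items_eq_of_keys_get?
  · rw [k5]; rfl
  · show (List.map Prod.fst (targetD c o h u l).items).Nodup
    have : List.map Prod.fst (targetD c o h u l).items =
      ["difok", "minlen", "dcredit", "ucredit", "lcredit", "ocredit", "remember", "PASS_MIN_DAYS", "PASS_MAX_DAYS"] := rfl
    rw [this]; decide
  · intro k hk
    replace hk : k ∈ (["difok", "minlen", "dcredit", "ucredit", "lcredit", "ocredit", "remember", "PASS_MIN_DAYS", "PASS_MAX_DAYS"] : List String) := hk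
    have hget : (Bdict c o h u l).get? k =
        if (["PASS_MIN_DAYS", "PASS_MAX_DAYS"].contains k && (pyget l k).isSome) then some (pyget l k)
        else if (["remember"].contains k && (pyget h k).isSome) then some (pyget h k)
        else if (["remember"].contains k && (pyget u k).isSome) then some (pyget u k)
        else if (pwqKeys.contains k && (pyget o k).isSome) then some (pyget o k)
        else if (pwqKeys.contains k && (pyget c k).isSome) then some (pyget c k)
        else basePolicy.get? k := by
      rw [Bdict, overlay_get _ _ _ _ hl, overlay_get _ _ _ _ hh,
          overlay_get _ _ _ _ hu, overlay_get _ _ _ _ ho, overlay_get _ _ _ _ hc]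
    rw [hget]
    fin_cases hk <;>
      · simp only [targetD, PySem.Dict.get?_mk_cons]
        simp [pwqKeys, basePolicy, PySem.Dict.get?_mk_cons, fb2]
        all_goals (split_ifs <;> simp_all)
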